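-- pv_equiv track=rewrite | github.com/softwareengineeraqsa-spec/Project-2 | House price prediction/house_price_prediction.py | detect_target_column
-- ===== SOURCE A (Python) =====
-- from typing import Iterable
--
-- COMMON_TARGETS = [
--     "price",
--     "saleprice",
--     "house_price",
--     "selling_price",
--     "target",
-- ]
--
-- def normalize_name(name: str) -> str:
--     return "".join(char.lower() for char in name if char.isalnum())
--
-- def detect_target_column(columns: Iterable[str]) -> str:
--     normalized_map = {normalize_name(column): column for column in columns}
--     for candidate in COMMON_TARGETS:
--         match = normalized_map.get(normalize_name(candidate))
--         if match:
--             return match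
--     raise ValueError(
--         "Could not detect the target price column automatically. "
--         f"Expected one of: {', '.join(COMMON_TARGETS)}"
--     )
-- ===== SOURCE B (Python) =====
-- COMMON_TARGETS = [
--     "price",
--     "saleprice",
--     "house_price",
--     "selling_price",
--     "target",
-- ]
--
-- def normalize_name(name: str) -> str:
--     return "".join(char.lower() for char in name if char.isalnum())
--
-- NORMALIZED_TARGETS = [normalize_name(t) for t in COMMON_TARGETS]
--
-- def detect_target_column(columns):
--     # single pass over the columns: keep the match with the lowest candidate
--     # rank, preferring the later column on equal rank (dict last-wins)
--     best = None  # (rank, column)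
--     for col in columns:
--         n = normalize_name(col)
--         if n in NORMALIZED_TARGETS:
--             r = NORMALIZED_TARGETS.index(n)
--             if best is None or r <= best[0]:
--                 best = (r, col)
--     if best is not None:
--         return best[1]
--     raise ValueError(
--         "Could not detect the target price column automatically. "
--         f"Expected one of: {', '.join(COMMON_TARGETS)}"
--     )
-- ===== Notes on version B (the rewrite author's own statement) =====
-- stated objective: alternative
-- what changed: B inverts the iteration: instead of A's build-a-normalized-name-dict then loop over candidates with lookups, B makes a single pass over the columns keeping the best match (lowest candidate rank, later column wins ties, reproducing the dict's last-wins), and returns it or raises the same ValueError.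
import Mathlib
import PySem

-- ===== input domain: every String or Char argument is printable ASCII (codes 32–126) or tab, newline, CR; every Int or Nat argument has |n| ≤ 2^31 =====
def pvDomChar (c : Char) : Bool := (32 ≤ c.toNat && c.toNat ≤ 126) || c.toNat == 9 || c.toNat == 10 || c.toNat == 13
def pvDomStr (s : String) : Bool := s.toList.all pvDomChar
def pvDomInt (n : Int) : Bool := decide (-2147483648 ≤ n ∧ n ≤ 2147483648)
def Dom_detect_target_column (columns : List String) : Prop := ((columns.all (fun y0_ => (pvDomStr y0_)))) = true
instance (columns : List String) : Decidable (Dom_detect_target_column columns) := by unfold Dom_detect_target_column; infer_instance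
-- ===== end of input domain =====

-- B replaces A's normalized-name-dict + candidate-order lookups by a single pass over the
-- columns keeping the lowest-rank (last-wins) match (alternative decomposition; similar cost).


-- shared module helpers (both Pythons use the same module-level helper and constant)
def COMMON_TARGETS : List String := ["price", "saleprice", "house_price", "selling_price", "target"]

-- "".join(char.lower() for char in name if char.isalnum())
def normalize_name (name : String) : String :=
  String.mk ((name.toList.filter (fun c => PySem.Chars.isalnum c)).map PySem.Chars.lowerChar)

-- ===== PORT A =====
-- the for-loop over COMMON_TARGETS; "" stands for the ValueError path (excluded by Pre_)
def loopA (m : PySem.Dict String String) : List String → String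
  | [] => ""
  | cand :: rest =>
    match m.get? (normalize_name cand) with
    | some v => if v ≠ "" then v else loopA m rest
    | none => loopA m rest

def detect_target_column (columns : List String) : String :=
  let normalized_map : PySem.Dict String String :=
    columns.foldl (fun d c => d.insert (normalize_name c) c) PySem.Dict.empty
  loopA normalized_map COMMON_TARGETS

-- ===== PORT B =====
-- NORMALIZED_TARGETS = [normalize_name(t) for t in COMMON_TARGETS]
def NORMALIZED_TARGETS : List String := COMMON_TARGETS.map normalize_name

-- the body of B's single for-loop over the columns: keep (rank, col) with the lowest
-- candidate rank, later column winning ties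
def stepB (best : Option (Nat × String)) (col : String) : Option (Nat × String) :=
  let n := normalize_name col
  if NORMALIZED_TARGETS.contains n then
    match PySem.List.index? NORMALIZED_TARGETS n with
    | some r =>
      match best with
      | none => some (r, col)
      | some (br, bv) => if r ≤ br then some (r, col) else some (br, bv)
    | none => best   -- unreachable: n is contained in the list
  else best

-- "" stands for the ValueError path (excluded by Pre_)
def detect_target_column_alt (columns : List String) : String :=
  match columns.foldl stepB none with
  | some (_, v) => v
  | none => ""

-- ===== PRECONDITION & SPEC =====
-- A raises ValueError when no column's normalized name is one of the normalized candidates; Pre_ excludes exactly those inputs.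
def Pre_detect_target_column (columns : List String) : Prop :=
  ∃ c ∈ columns, normalize_name c ∈ (["price", "saleprice", "houseprice", "sellingprice", "target"] : List String)
instance (columns : List String) : Decidable (Pre_detect_target_column columns) := by unfold Pre_detect_target_column; infer_instance
def pvWitness_detect_target_column : List String := ["Sale Price"]

def Spec_detect_target_column (columns : List String) (out : String) : Prop := out = detect_target_column_alt columns
instance (columns : List String) (out : String) : Decidable (Spec_detect_target_column columns out) := by unfold Spec_detect_target_column; infer_instance

-- ===== CLAIM (what is proved, stated in full; the proofs are below) =====
def Claim_equal_detect_target_column : Prop := ∀ (columns : List String), Dom_detect_target_column columns → Pre_detect_target_column columns → Spec_detect_target_column columns (detect_target_column columns)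

-- ===== LEMMAS AND PROOFS =====

-- proof-side helper: the last column whose normalized name equals key
def lastMatch (key : String) (cols : List String) : Option String :=
  cols.foldl (fun found col => if normalize_name col = key then some col else found) none

-- proof-side helper: candidate-priority selection expressed through lastMatch
def chain (cols : List String) : Option (Nat × String) :=
  match lastMatch "price" cols with
  | some v => some (0, v)
  | none =>
    match lastMatch "saleprice" cols with
    | some v => some (1, v)
    | none =>
      match lastMatch "houseprice" cols with
      | some v => some (2, v)
      | none =>
        match lastMatch "sellingprice" cols with
        | some v => some (3, v)
        | none =>
          match lastMatch "target" cols with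
          | some v => some (4, v)
          | none => none

-- A's dict lookup after the build loop IS the last-match scan of the columns
theorem get?_foldl_insert_eq_lastMatch_aux (cols : List String) (d : PySem.Dict String String) (key : String) :
    (cols.foldl (fun d c => d.insert (normalize_name c) c) d).get? key =
      cols.foldl (fun found col => if normalize_name col = key then some col else found) (d.get? key) := by
  induction cols generalizing d with
  | nil => rfl
  | cons c cs ih =>
    simp only [List.foldl_cons, ih]
    congr 1
    rw [PySem.Dict.get?_insert]
    by_cases h : normalize_name c = key
    · simp [h]
    · rw [if_neg (fun hk : key = normalize_name c => h hk.symm), if_neg h]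

theorem get?_foldl_insert_eq_lastMatch (cols : List String) (key : String) :
    (cols.foldl (fun d c => d.insert (normalize_name c) c) PySem.Dict.empty).get? key = lastMatch key cols := by
  rw [get?_foldl_insert_eq_lastMatch_aux, lastMatch, PySem.Dict.get?_empty]

theorem lastMatch_norm (key : String) (cols : List String) (v : String)
    (h : lastMatch key cols = some v) : normalize_name v = key := by
  rw [lastMatch] at h
  induction cols using List.reverseRecOn with
  | nil => simp at h
  | append_singleton cs c ih =>
    rw [List.foldl_append, List.foldl_cons, List.foldl_nil] at h
    by_cases hc : normalize_name c = key
    · rw [if_pos hc] at h; cases h; exact hc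
    · rw [if_neg hc] at h; exact ih h

theorem lastMatch_append (key : String) (cs : List String) (c : String) :
    lastMatch key (cs ++ [c]) = if normalize_name c = key then some c else lastMatch key cs := by
  simp only [lastMatch, List.foldl_append, List.foldl_cons, List.foldl_nil]

theorem NT_eval : NORMALIZED_TARGETS = ["price", "saleprice", "houseprice", "sellingprice", "target"] := by decide

-- B's fold computes the candidate-priority selection
set_option maxHeartbeats 1000000 in
theorem foldB_eq_chain (cols : List String) : cols.foldl stepB none = chain cols := by
  induction cols using List.reverseRecOn with
  | nil => rfl
  | append_singleton cs c ih =>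
    rw [List.foldl_append, List.foldl_cons, List.foldl_nil, ih]
    by_cases h0 : normalize_name c = "price"
    · simp only [chain, lastMatch_append, h0, stepB]
      cases lastMatch "price" cs <;> cases lastMatch "saleprice" cs <;>
        cases lastMatch "houseprice" cs <;> cases lastMatch "sellingprice" cs <;>
        cases lastMatch "target" cs <;>
        simp [NT_eval, List.idxOf?, List.findIdx?_cons]
    · by_cases h1 : normalize_name c = "saleprice"
      · simp only [chain, lastMatch_append, h1, stepB]
        cases lastMatch "price" cs <;> cases lastMatch "saleprice" cs <;>
          cases lastMatch "houseprice" cs <;> cases lastMatch "sellingprice" cs <;>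
          cases lastMatch "target" cs <;>
          simp [NT_eval, List.idxOf?, List.findIdx?_cons]
      · by_cases h2 : normalize_name c = "houseprice"
        · simp only [chain, lastMatch_append, h2, stepB]
          cases lastMatch "price" cs <;> cases lastMatch "saleprice" cs <;>
            cases lastMatch "houseprice" cs <;> cases lastMatch "sellingprice" cs <;>
            cases lastMatch "target" cs <;>
            simp [NT_eval, List.idxOf?, List.findIdx?_cons]
        · by_cases h3 : normalize_name c = "sellingprice"
          · simp only [chain, lastMatch_append, h3, stepB]
            cases lastMatch "price" cs <;> cases lastMatch "saleprice" cs <;>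
              cases lastMatch "houseprice" cs <;> cases lastMatch "sellingprice" cs <;>
              cases lastMatch "target" cs <;>
              simp [NT_eval, List.idxOf?, List.findIdx?_cons]
          · by_cases h4 : normalize_name c = "target"
            · simp only [chain, lastMatch_append, h4, stepB]
              cases lastMatch "price" cs <;> cases lastMatch "saleprice" cs <;>
                cases lastMatch "houseprice" cs <;> cases lastMatch "sellingprice" cs <;>
                cases lastMatch "target" cs <;>
                simp [NT_eval, List.idxOf?, List.findIdx?_cons]
            · simp only [chain, lastMatch_append, stepB, if_neg h0, if_neg h1, if_neg h2, if_neg h3, if_neg h4]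
              have hnc : NORMALIZED_TARGETS.contains (normalize_name c) = false := by
                rw [NT_eval]
                simp only [List.contains_cons, List.contains_nil, Bool.or_false, Bool.or_eq_false_iff,
                  beq_eq_false_iff_ne, ne_eq]
                exact ⟨h0, h1, h2, h3, h4⟩
              have hmem : normalize_name c ∉ NORMALIZED_TARGETS := by simpa using hnc
              simp [hmem]

-- a matched value is never the empty string (its normalization is a nonempty key)
theorem lastMatch_ne_empty (key : String) (cols : List String) (v : String)
    (h : lastMatch key cols = some v) (hk : key ≠ "") : v ≠ "" := by
  intro hv
  apply hk
  rw [← lastMatch_norm key cols v h, hv]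
  rfl

-- A's whole computation equals the candidate-priority selection
theorem A_eq_chain (cols : List String) :
    detect_target_column cols = (match chain cols with | some (_, v) => v | none => "") := by
  rw [detect_target_column]
  show loopA _ COMMON_TARGETS = _
  rw [COMMON_TARGETS, chain]
  simp only [loopA, get?_foldl_insert_eq_lastMatch]
  have e0 : normalize_name "price" = "price" := by decide
  have e1 : normalize_name "saleprice" = "saleprice" := by decide
  have e2 : normalize_name "house_price" = "houseprice" := by decide
  have e3 : normalize_name "selling_price" = "sellingprice" := by decide
  have e4 : normalize_name "target" = "target" := by decide
  rw [e0, e1, e2, e3, e4]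
  cases hm0 : lastMatch "price" cols with
  | some v => simp [lastMatch_ne_empty _ _ _ hm0 (by decide)]
  | none =>
    cases hm1 : lastMatch "saleprice" cols with
    | some v => simp [lastMatch_ne_empty _ _ _ hm1 (by decide)]
    | none =>
      cases hm2 : lastMatch "houseprice" cols with
      | some v => simp [lastMatch_ne_empty _ _ _ hm2 (by decide)]
      | none =>
        cases hm3 : lastMatch "sellingprice" cols with
        | some v => simp [lastMatch_ne_empty _ _ _ hm3 (by decide)]
        | none =>
          cases hm4 : lastMatch "target" cols with
          | some v => simp [lastMatch_ne_empty _ _ _ hm4 (by decide)]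
          | none => simp

-- ===== VERDICT (by name: the statement is the Claim_ definition above) =====
theorem detect_target_column_spec : Claim_equal_detect_target_column := by
  intro columns _ _
  show detect_target_column columns = detect_target_column_alt columns
  rw [A_eq_chain, detect_target_column_alt, foldB_eq_chain]
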